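-- pv_equiv track=rewrite | github.com/UncaughtCursor/MariOverMC | levelInfoWebserver.py | course_id_to_dataid
-- ===== SOURCE A (Python) =====
-- def course_id_to_dataid(id):
-- 	# https://github.com/kinnay/NintendoClients/wiki/Data-Store-Codes#super-mario-maker-2
-- 	course_id = id[::-1]
-- 	charset = "0123456789BCDFGHJKLMNPQRSTVWXY"
-- 	number = 0
-- 	for char in course_id:
-- 		number = number * 30 + charset.index(char)
-- 	left_side = number
-- 	left_side = left_side << 34
-- 	left_side_replace_mask = 0b1111111111110000000000000000000000000000000000
-- 	number = number ^ ((number ^ left_side) & left_side_replace_mask)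
-- 	number = number >> 14
-- 	number = number ^ 0b00010110100000001110000001111100
-- 	return number
-- ===== SOURCE B (Python) =====
-- def course_id_to_dataid(id):
-- 	# digit table built once + divide-and-conquer base-30 evaluation (no reversal, no Horner pass)
-- 	digit = {c: i for i, c in enumerate("0123456789BCDFGHJKLMNPQRSTVWXY")}
-- 	def value(s):
-- 		# value of s where s[i] carries weight 30**i
-- 		if len(s) <= 1:
-- 			return digit[s] if s else 0
-- 		m = len(s) // 2
-- 		return value(s[:m]) + 30 ** m * value(s[m:])
-- 	number = value(id)
-- 	left_side = number << 34
-- 	left_side_replace_mask = 0b1111111111110000000000000000000000000000000000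
-- 	number ^= (number ^ left_side) & left_side_replace_mask
-- 	number >>= 14
-- 	return number ^ 0b00010110100000001110000001111100
-- ===== Notes on version B (the rewrite author's own statement) =====
-- stated objective: alternative
-- what changed: Replaces the reverse-then-Horner scan with repeated charset.index calls by a digit-lookup dict built once plus a divide-and-conquer evaluation value(s) = value(s[:m]) + 30**m * value(s[m:]); the O(1) bit-manipulation tail is unchanged.
import Mathlib
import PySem

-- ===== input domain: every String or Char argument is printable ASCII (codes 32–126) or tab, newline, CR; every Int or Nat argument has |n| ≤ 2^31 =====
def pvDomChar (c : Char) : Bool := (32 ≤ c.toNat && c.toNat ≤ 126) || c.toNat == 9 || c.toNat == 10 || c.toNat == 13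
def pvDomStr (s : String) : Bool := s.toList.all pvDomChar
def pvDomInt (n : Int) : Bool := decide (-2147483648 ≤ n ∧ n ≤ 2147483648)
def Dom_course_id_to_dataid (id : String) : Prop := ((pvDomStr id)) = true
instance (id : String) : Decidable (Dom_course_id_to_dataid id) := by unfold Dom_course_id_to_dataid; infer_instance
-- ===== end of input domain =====

-- B replaces the reverse-then-Horner charset.index scan by a digit dict built once plus a divide-and-conquer base-30 evaluation; the bit tail is unchanged.

def pvCharset : List Char := "0123456789BCDFGHJKLMNPQRSTVWXY".toList

-- charset.index(char): ValueError (none) excluded by Pre_; getD 0 only outside Pre_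
def pvIdx (c : Char) : Int := ((PySem.List.index? pvCharset c).getD 0 : Nat)

-- ===== PORT A =====
def course_id_to_dataid (id : String) : Int :=
  -- course_id = id[::-1] is exactly the reversed character list
  let number : Int := (id.toList.reverse).foldl (fun n c => n * 30 + pvIdx c) 0
  let left_side := number
  let left_side := left_side <<< 34
  let left_side_replace_mask : Int := 0b1111111111110000000000000000000000000000000000
  let number := PySem.Int.bxor number (PySem.Int.band (PySem.Int.bxor number left_side) left_side_replace_mask)
  let number := number >>> 14
  PySem.Int.bxor number 0b00010110100000001110000001111100

-- ===== PORT B =====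
-- digit = {c: i for i, c in enumerate(charset)}
def pvDigit : PySem.Dict Char Int :=
  (PySem.List.enumerate "0123456789BCDFGHJKLMNPQRSTVWXY".toList 0).foldl
    (fun d p => d.insert p.2 p.1) PySem.Dict.empty

-- value(s): divide and conquer; digit[s] (KeyError = none) is excluded by Pre_, getD 0 only outside Pre_
def pvValue (s : List Char) : Int :=
  if _h : s.length ≤ 1 then
    match s with
    | [] => 0
    | c :: _ => (PySem.Dict.get? pvDigit c).getD 0
  else
    let m := s.length / 2
    pvValue (s.take m) + 30 ^ m * pvValue (s.drop m)
termination_by s.length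
decreasing_by
  · simp only [List.length_take]; omega
  · simp only [List.length_drop]; omega

def course_id_to_dataid_alt (id : String) : Int :=
  let number := pvValue id.toList
  let left_side := number <<< 34
  let left_side_replace_mask : Int := 0b1111111111110000000000000000000000000000000000
  let number := PySem.Int.bxor number (PySem.Int.band (PySem.Int.bxor number left_side) left_side_replace_mask)
  let number := number >>> 14
  PySem.Int.bxor number 0b00010110100000001110000001111100

-- ===== PRECONDITION & SPEC =====
-- Pre_: exactly the inputs where charset.index never raises ValueError (every char of id is in the base-30 charset)
def Pre_course_id_to_dataid (id : String) : Prop := id.toList.all (fun c => pvCharset.contains c) = true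
instance (id : String) : Decidable (Pre_course_id_to_dataid id) := by unfold Pre_course_id_to_dataid; infer_instance
def pvWitness_course_id_to_dataid : String := "BCDF"
def Spec_course_id_to_dataid (id : String) (out : Int) : Prop := out = course_id_to_dataid_alt id
instance (id : String) (out : Int) : Decidable (Spec_course_id_to_dataid id out) := by unfold Spec_course_id_to_dataid; infer_instance

-- ===== CLAIM (what is proved, stated in full; the proofs are below) =====
def Claim_equal_course_id_to_dataid : Prop := ∀ (id : String), Dom_course_id_to_dataid id → Pre_course_id_to_dataid id → Spec_course_id_to_dataid id (course_id_to_dataid id)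

-- ===== LEMMAS AND PROOFS =====

-- A's base-30 accumulator (Horner over the reversed string): id[0] carries weight 30^0
def pvH (l : List Char) : Int := l.reverse.foldl (fun n c => n * 30 + pvIdx c) 0

theorem pvH_shift (l : List Char) : ∀ a : Int,
    l.foldl (fun n c => n * 30 + pvIdx c) a = a * 30 ^ l.length + l.foldl (fun n c => n * 30 + pvIdx c) 0 := by
  induction l with
  | nil => intro a; simp
  | cons c l ih =>
    intro a
    simp only [List.foldl_cons, List.length_cons]
    rw [ih (a * 30 + pvIdx c), ih (0 * 30 + pvIdx c)]
    ring

theorem pvH_append (l₁ l₂ : List Char) : pvH (l₁ ++ l₂) = pvH l₁ + 30 ^ l₁.length * pvH l₂ := by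
  unfold pvH
  rw [List.reverse_append, List.foldl_append, pvH_shift]
  simp only [List.length_reverse]
  ring

theorem pvDigit_eq (c : Char) (h : pvCharset.contains c = true) :
    (PySem.Dict.get? pvDigit c).getD 0 = pvIdx c := by
  have hall : pvCharset.all (fun c => decide ((PySem.Dict.get? pvDigit c).getD 0 = pvIdx c)) = true := by decide
  exact of_decide_eq_true (List.all_eq_true.mp hall c (List.contains_iff_mem.mp h))

theorem pvValue_eq (l : List Char) (h : ∀ c ∈ l, pvCharset.contains c = true) :
    pvValue l = pvH l := by
  rw [pvValue]
  split
  · rename_i h1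
    match l, h1 with
    | [], _ => simp [pvH]
    | [c], _ =>
      simp only [pvH, List.reverse_singleton, List.foldl_cons, List.foldl_nil, zero_mul, zero_add]
      exact pvDigit_eq c (h c (by simp))
  · rename_i h1
    have hm : l.length / 2 < l.length := by omega
    have ht := pvValue_eq (l.take (l.length / 2)) (fun c hc => h c (List.mem_of_mem_take hc))
    have hd := pvValue_eq (l.drop (l.length / 2)) (fun c hc => h c (List.mem_of_mem_drop hc))
    show pvValue (l.take (l.length / 2)) + 30 ^ (l.length / 2) * pvValue (l.drop (l.length / 2)) = pvH l
    rw [ht, hd]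
    have hsplit : l = l.take (l.length / 2) ++ l.drop (l.length / 2) := (List.take_append_drop _ _).symm
    conv_rhs => rw [hsplit]
    rw [pvH_append, List.length_take]
    have : min (l.length / 2) l.length = l.length / 2 := by omega
    rw [this]
termination_by l.length
decreasing_by
  · simp only [List.length_take]; omega
  · simp only [List.length_drop]; omega

-- ===== VERDICT (by name: the statement is the Claim_ definition above) =====
theorem course_id_to_dataid_spec : Claim_equal_course_id_to_dataid := by
  intro id _ hpre
  unfold Spec_course_id_to_dataid course_id_to_dataid course_id_to_dataid_alt
  rw [pvValue_eq id.toList (fun c hc => List.all_eq_true.mp hpre c hc)]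
  rfl
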